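-- pv_equiv track=rewrite | github.com/Shash-Rao/connections-generator | generators/semantic.py | surface_overlap_ok
-- ===== SOURCE A (Python) =====
-- def surface_overlap_ok(subject, words):
--     if any(word == subject for word in words):
--         return False
--     if any(word in subject for word in words):
--         return False
--     if any(subject in word for word in words):
--         return False
--     return True
-- ===== SOURCE B (Python) =====
-- def surface_overlap_ok(subject, words):
--     for word in words:
--         if word in subject or subject in word:
--             return False
--     return True
-- ===== Notes on version B (the rewrite author's own statement) =====
-- stated objective: simpler
-- what changed: Replaces three separate full scans (equality, substring-of-subject, subject-in-word) with one early-exit loop checking containment both ways per element; the equality scan is dropped as it is subsumed by substring containment.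
import Mathlib
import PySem

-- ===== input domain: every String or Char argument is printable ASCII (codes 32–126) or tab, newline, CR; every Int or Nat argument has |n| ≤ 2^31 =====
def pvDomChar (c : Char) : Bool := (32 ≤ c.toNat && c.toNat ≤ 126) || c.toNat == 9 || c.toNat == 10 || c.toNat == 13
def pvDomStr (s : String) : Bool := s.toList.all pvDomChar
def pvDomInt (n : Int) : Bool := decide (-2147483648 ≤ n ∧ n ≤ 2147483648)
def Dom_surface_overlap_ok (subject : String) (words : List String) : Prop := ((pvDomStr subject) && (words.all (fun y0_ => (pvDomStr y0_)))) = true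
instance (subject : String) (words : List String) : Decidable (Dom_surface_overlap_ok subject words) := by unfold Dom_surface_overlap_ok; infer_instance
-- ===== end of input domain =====

-- B: one early-exit pass checking containment both ways, instead of A's three separate scans (equality is subsumed by containment); objective: simpler.
-- ===== PORT A =====
def surface_overlap_ok (subject : String) (words : List String) : Bool :=
  if words.any (fun word => word == subject) then false
  else if words.any (fun word => PySem.Str.isIn word subject) then false
  else if words.any (fun word => PySem.Str.isIn subject word) then false
  else true

-- ===== PORT B =====
def surface_overlap_ok_alt (subject : String) (words : List String) : Bool :=
  match words with
  | [] => true
  | word :: rest =>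
    if PySem.Str.isIn word subject || PySem.Str.isIn subject word then false
    else surface_overlap_ok_alt subject rest

-- ===== PRECONDITION & SPEC =====
def Spec_surface_overlap_ok (subject : String) (words : List String) (out : Bool) : Prop := out = surface_overlap_ok_alt subject words
instance (subject : String) (words : List String) (out : Bool) : Decidable (Spec_surface_overlap_ok subject words out) := by unfold Spec_surface_overlap_ok; infer_instance

-- ===== CLAIM (what is proved, stated in full; the proofs are below) =====
def Claim_equal_surface_overlap_ok : Prop := ∀ (subject : String) (words : List String), Dom_surface_overlap_ok subject words → Spec_surface_overlap_ok subject words (surface_overlap_ok subject words)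

-- ===== LEMMAS AND PROOFS =====

-- B's loop as a Boolean formula
theorem alt_eq_not_any (subject : String) (words : List String) :
    surface_overlap_ok_alt subject words
      = !(words.any (fun w => PySem.Str.isIn w subject || PySem.Str.isIn subject w)) := by
  induction words with
  | nil => rfl
  | cons w rest ih =>
    simp only [surface_overlap_ok_alt, List.any_cons]
    cases h : (PySem.Str.isIn w subject || PySem.Str.isIn subject w)
    · simp only [Bool.false_eq_true, if_false, ih, Bool.false_or]
    · simp only [if_true, Bool.true_or, Bool.not_true]

-- a string is a substring of itself
theorem isIn_self (s : String) : PySem.Str.isIn s s = true := by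
  rw [PySem.Str.isIn_iff_infix]

-- the equality scan is subsumed by the containment scan
theorem eq_scan_subsumed (subject : String) (words : List String)
    (h : words.any (fun word => word == subject) = true) :
    words.any (fun word => PySem.Str.isIn word subject) = true := by
  rcases List.any_eq_true.mp h with ⟨w, hw, hwq⟩
  refine List.any_eq_true.mpr ⟨w, hw, ?_⟩
  rcases beq_iff_eq.mp hwq with rfl
  exact isIn_self w

-- any over a disjunction splits into two anys
theorem any_or_split (l : List String) (p q : String → Bool) :
    l.any (fun w => p w || q w) = (l.any p || l.any q) := by
  induction l with
  | nil => rfl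
  | cons a rest ih =>
    simp only [List.any_cons, ih]
    cases p a <;> cases q a <;> simp only [Bool.true_or, Bool.false_or, Bool.or_assoc,
      Bool.or_comm, Bool.or_left_comm]

-- ===== VERDICT (by name: the statement is the Claim_ definition above) =====
theorem surface_overlap_ok_spec : Claim_equal_surface_overlap_ok := by
  intro subject words _
  unfold Spec_surface_overlap_ok surface_overlap_ok
  rw [alt_eq_not_any, any_or_split]
  cases hE : words.any (fun word => word == subject)
  · simp only [Bool.false_eq_true, if_false]
    cases hP : words.any (fun word => PySem.Str.isIn word subject)
    · simp only [Bool.false_eq_true, if_false, Bool.false_or]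
      cases hQ : words.any (fun word => PySem.Str.isIn subject word)
      · simp only [Bool.false_eq_true, if_false, Bool.not_false]
      · simp only [if_true, Bool.not_true]
    · simp only [if_true, Bool.true_or, Bool.not_true]
  · have hP := eq_scan_subsumed subject words hE
    simp only [if_true, hP, Bool.true_or, Bool.not_true]
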